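-- pv_equiv track=rewrite | github.com/WSm-77/text_algorithms | lab2/lab_2/kmp_algorithm.py | kmp_pattern_match
-- ===== SOURCE A (Python) =====
-- def compute_lps_array(pattern: str) -> list[int]:
--     """
--     Compute the Longest Proper Prefix which is also Suffix array for KMP algorithm.
--
--     Args:
--         pattern: The pattern string
--
--     Returns:
--         The LPS array
--     """
--     # TODO: Implement the Longest Prefix Suffix (LPS) array computation
--     # The LPS array helps in determining how many characters to skip when a mismatch occurs
--     # For each position i, compute the length of the longest proper prefix of pattern[0...i]
--     # that is also a suffix of pattern[0...i]
--     # Hint: Use the information from previously computed values to avoid redundant comparisons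
--
--     # pattern_len = len(pattern)
--     # z_arr = compute_z_array(pattern)
--     # lps_arr = [0] * (pattern_len + 1)
--
--     # for i in range(pattern_len - 1, 0, -1):
--     #     lps_arr[i + z_arr[i]] = z_arr[i]
--
--     # return lps_arr
--     lps = [0] * len(pattern)
--     length = 0  # Length of the previous longest prefix suffix
--     i = 1
--
--     while i < len(pattern):
--         if pattern[i] == pattern[length]:
--             length += 1
--             lps[i] = length
--             i += 1
--         else:
--             if length != 0:
--                 length = lps[length - 1]
--             else:
--                 lps[i] = 0
--                 i += 1
--
--     return lps
--
-- def kmp_pattern_match(text: str, pattern: str) -> list[int]: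
--     """
--     Implementation of the Knuth-Morris-Pratt pattern matching algorithm.
--
--     Args:
--         text: The text to search in
--         pattern: The pattern to search for
--
--     Returns:
--         A list of starting positions (0-indexed) where the pattern was found in the text
--     """
--     # Implement the KMP string matching algorithm
--     # 1. Preprocess the pattern to compute the LPS array
--     # 2. Use the LPS array to determine how much to shift the pattern when a mismatch occurs
--     # 3. This avoids redundant comparisons by using information about previous matches
--     # 4. Return all positions where the pattern is found in the text
--
--     text_len = len(text)
--     pattern_len = len(pattern)
--
--     if text_len < pattern_len or pattern_len == 0:
--         return []
--
--     result = []
--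
--     p = compute_lps_array(pattern)
--     j = 0
--     for i in range(len(text)):
--         while j > 0 and text[i] != pattern[j]:
--             j = p[j - 1]
--
--         if text[i] == pattern[j]:
--             j += 1
--
--         if j == len(pattern):
--             result.append(i - len(pattern) + 1)
--             j = p[j - 1]
--
--     return result
-- ===== SOURCE B (Python) =====
-- def kmp_pattern_match(text: str, pattern: str) -> list[int]:
--     """Naive sliding-window search: check every window of len(pattern) by direct slice comparison."""
--     m = len(pattern)
--     if m == 0 or m > len(text):
--         return []
--     return [i for i in range(len(text) - m + 1) if text[i:i+m] == pattern]
-- ===== Notes on version B (the rewrite author's own statement) =====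
-- stated objective: simpler
-- what changed: Replaces KMP (LPS prefix-function table plus a two-pointer automaton with fallback) by a one-line sliding-window scan comparing each slice text[i:i+m] with the pattern directly.
import Mathlib
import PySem

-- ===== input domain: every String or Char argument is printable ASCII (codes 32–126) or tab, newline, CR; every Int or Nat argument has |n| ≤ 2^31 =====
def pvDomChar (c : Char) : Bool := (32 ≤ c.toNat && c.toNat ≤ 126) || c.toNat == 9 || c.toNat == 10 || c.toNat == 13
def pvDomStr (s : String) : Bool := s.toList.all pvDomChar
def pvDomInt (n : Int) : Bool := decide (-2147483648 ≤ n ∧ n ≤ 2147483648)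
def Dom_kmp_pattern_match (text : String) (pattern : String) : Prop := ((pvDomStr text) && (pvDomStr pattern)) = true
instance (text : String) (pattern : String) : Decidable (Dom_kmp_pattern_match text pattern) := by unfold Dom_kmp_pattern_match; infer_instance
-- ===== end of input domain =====

-- B replaces KMP (LPS table + two-pointer automaton) by a one-line sliding-window slice comparison; objective: simpler.

-- ===== PORT A =====
-- The ports work on text.toList / pattern.toList; Python's in-range s[i] is List.getD i 'a'
-- (every index reached is proved in range). Each Python while-loop becomes a fueled recursion;
-- the fuel only bounds the iteration count of the identical computation and is proved sufficient.

-- the `while i < len(pattern)` loop of compute_lps_array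
def lpsLoop (p : List Char) : Nat → List Nat → Nat → Nat → List Nat
  | 0, lps, _, _ => lps
  | fuel + 1, lps, len, i =>
    if i < p.length then
      if p.getD i 'a' = p.getD len 'a' then
        lpsLoop p fuel (lps.set i (len + 1)) (len + 1) (i + 1)
      else if len ≠ 0 then
        lpsLoop p fuel lps (lps.getD (len - 1) 0) i
      else
        lpsLoop p fuel (lps.set i 0) 0 (i + 1)
    else lps

def compute_lps_array (p : List Char) : List Nat :=
  lpsLoop p (2 * p.length) (List.replicate p.length 0) 0 1

-- the inner `while j > 0 and text[i] != pattern[j]` loop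
def kmpInner (p : List Char) (lpsArr : List Nat) (c : Char) : Nat → Nat → Nat
  | 0, j => j
  | fuel + 1, j =>
    if 0 < j ∧ c ≠ p.getD j 'a' then kmpInner p lpsArr c fuel (lpsArr.getD (j - 1) 0) else j

-- the `for i in range(len(text))` loop
def kmpLoop (p : List Char) (lpsArr : List Nat) : List Char → Nat → Nat → List Int → List Int
  | [], _, _, res => res
  | c :: rest, i, j, res =>
    let j1 := kmpInner p lpsArr c (j + 1) j
    let j2 := if c = p.getD j1 'a' then j1 + 1 else j1
    if j2 = p.length then
      kmpLoop p lpsArr rest (i + 1) (lpsArr.getD (j2 - 1) 0) (res ++ [(i : Int) - (p.length : Int) + 1])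
    else
      kmpLoop p lpsArr rest (i + 1) j2 res

def kmp_pattern_match (text : String) (pattern : String) : List Int :=
  let t := text.toList
  let p := pattern.toList
  if t.length < p.length ∨ p.length = 0 then []
  else kmpLoop p (compute_lps_array p) t 0 0 []

-- ===== PORT B =====
-- Source B: [i for i in range(len(text) - m + 1) if text[i:i+m] == pattern]; the slice text[i:i+m]
-- (0 ≤ i, i+m ≤ len) is exactly (t.drop i).take m.
def kmp_pattern_match_alt (text : String) (pattern : String) : List Int :=
  let t := text.toList
  let p := pattern.toList
  if p.length = 0 ∨ p.length > t.length then []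
  else
    ((List.range (t.length - p.length + 1)).filter
      (fun i => (t.drop i).take p.length == p)).map (fun i => (i : Int))

-- ===== PRECONDITION & SPEC =====
def Spec_kmp_pattern_match (text : String) (pattern : String) (out : List Int) : Prop := out = kmp_pattern_match_alt text pattern
instance (text : String) (pattern : String) (out : List Int) : Decidable (Spec_kmp_pattern_match text pattern out) := by unfold Spec_kmp_pattern_match; infer_instance

-- ===== CLAIM (what is proved, stated in full; the proofs are below) =====
def Claim_equal_kmp_pattern_match : Prop := ∀ (text : String) (pattern : String), Dom_kmp_pattern_match text pattern → Spec_kmp_pattern_match text pattern (kmp_pattern_match text pattern)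

-- ===== LEMMAS AND PROOFS =====

-- the greatest k ≤ b such that the k-prefix of p is a suffix of l
def sfxG (p l : List Char) (b : Nat) : Nat := Nat.findGreatest (fun k => p.take k <:+ l) b

-- length of the longest proper border of the i-prefix of p
def bordP (p : List Char) (i : Nat) : Nat := sfxG p (p.take i) (i - 1)

-- lps is the correct border table of p
def lpsGood (p : List Char) (lps : List Nat) : Prop :=
  lps.length = p.length ∧ ∀ t, t < p.length → lps.getD t 0 = bordP p (t + 1)

-- occurrences of p completed within the first i characters of t
def occList (p t : List Char) (i : Nat) : List Int :=
  ((List.range (i + 1 - p.length)).filter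
    (fun o => (t.drop o).take p.length == p)).map (fun o => (o : Int))

theorem sfxG_le (p l : List Char) (b : Nat) : sfxG p l b ≤ b := Nat.findGreatest_le b

theorem sfxG_suffix (p l : List Char) (b : Nat) : p.take (sfxG p l b) <:+ l :=
  Nat.findGreatest_spec (P := fun k => p.take k <:+ l) (Nat.zero_le b)
    (by simp)

theorem le_sfxG (p l : List Char) {b k : Nat} (hk : k ≤ b) (h : p.take k <:+ l) : k ≤ sfxG p l b :=
  Nat.le_findGreatest hk h

theorem concat_suffix_concat (s l : List Char) (x c : Char) :
    s ++ [x] <:+ l ++ [c] ↔ s <:+ l ∧ x = c := by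
  constructor
  · rintro ⟨u, hu⟩
    have h2 : (u ++ s) ++ [x] = l ++ [c] := by rw [List.append_assoc]; exact hu
    have h3 := List.append_inj' h2 (by simp)
    exact ⟨⟨u, h3.1⟩, by simpa using h3.2⟩
  · rintro ⟨⟨u, hu⟩, rfl⟩
    exact ⟨u, by rw [← List.append_assoc, hu]⟩

theorem take_succ_suffix_append (p l : List Char) (c : Char) {k : Nat} (hk : k < p.length) :
    p.take (k + 1) <:+ l ++ [c] ↔ (p.take k <:+ l ∧ p.getD k 'a' = c) := by
  rw [List.take_succ_eq_append_getElem hk, List.getD_eq_getElem p 'a' hk, concat_suffix_concat]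

-- two prefixes of p that are suffixes of the same l are nested
theorem chain_down (p l : List Char) {k j : Nat} (hk : p.take k <:+ l) (hj : p.take j <:+ l)
    (hkj : k ≤ j) (hjm : j ≤ p.length) : p.take k <:+ p.take j := by
  apply List.suffix_of_suffix_length_le hk hj
  simp only [List.length_take]
  omega

theorem bordP_lt (p : List Char) {i : Nat} (hi : 0 < i) : bordP p i < i :=
  lt_of_le_of_lt (sfxG_le _ _ _) (by omega)

theorem bordP_suffix (p : List Char) (i : Nat) : p.take (bordP p i) <:+ p.take i :=
  sfxG_suffix _ _ _

theorem getD_set_ne' (l : List Nat) (i v t : Nat) (h : t ≠ i) :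
    (l.set i v).getD t 0 = l.getD t 0 := by
  simp [List.getD, List.getElem?_set_ne (fun hh => h hh.symm)]

theorem kmpInner_spec (p : List Char) (lps : List Nat) (hl : lpsGood p lps) (c : Char) (l : List Char) :
    ∀ fuel j, j < fuel → j < p.length → p.take j <:+ l →
      (kmpInner p lps c fuel j ≤ j ∧ kmpInner p lps c fuel j < p.length ∧
       p.take (kmpInner p lps c fuel j) <:+ l ∧
       (kmpInner p lps c fuel j = 0 ∨ c = p.getD (kmpInner p lps c fuel j) 'a') ∧
       (∀ k, k ≤ j → p.take k <:+ l → c = p.getD k 'a' → k ≤ kmpInner p lps c fuel j)) := by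
  intro fuel
  induction fuel with
  | zero => intro j hj; omega
  | succ fuel ih =>
    intro j hj hjm hsfx
    by_cases hcond : 0 < j ∧ c ≠ p.getD j 'a'
    · have hj1 : (j - 1) + 1 = j := by omega
      have hnext : lps.getD (j - 1) 0 = bordP p j := by
        have := hl.2 (j - 1) (by omega)
        rwa [hj1] at this
      have hlt : bordP p j < j := bordP_lt p hcond.1
      have hsfx' : p.take (lps.getD (j - 1) 0) <:+ l := by
        rw [hnext]
        exact (bordP_suffix p j).trans hsfx
      have hrec : kmpInner p lps c (fuel + 1) j = kmpInner p lps c fuel (lps.getD (j - 1) 0) := by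
        rw [kmpInner, if_pos hcond]
      have hy := ih (lps.getD (j - 1) 0) (by omega) (by omega) hsfx'
      rw [hrec]
      refine ⟨by omega, hy.2.1, hy.2.2.1, hy.2.2.2.1, ?_⟩
      intro k hk hks hkc
      by_cases hkj : k = j
      · subst hkj; exact absurd hkc hcond.2
      · have hklt : k < j := by omega
        have hchain : p.take k <:+ p.take j := chain_down p l hks hsfx (by omega) (by omega)
        have : k ≤ bordP p j := le_sfxG p _ (by omega) hchain
        exact hy.2.2.2.2 k (by omega) hks hkc
    · have hstop : kmpInner p lps c (fuel + 1) j = j := by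
        rw [kmpInner, if_neg hcond]
      rw [hstop]
      push Not at hcond
      refine ⟨Nat.le_refl _, hjm, hsfx, ?_, fun k hk _ _ => hk⟩
      by_cases h0 : j = 0
      · exact Or.inl h0
      · exact Or.inr (hcond (by omega))

theorem lpsLoop_spec (p : List Char) : ∀ fuel i len lps,
    1 ≤ i → i ≤ p.length → len < i → p.take len <:+ p.take i →
    (∀ k, k < i → p.take k <:+ p.take i → p.getD k 'a' = p.getD i 'a' → k ≤ len) →
    lps.length = p.length → (∀ t, t < i → lps.getD t 0 = bordP p (t + 1)) →
    2 * (p.length - i) + len ≤ fuel →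
    lpsGood p (lpsLoop p fuel lps len i) := by
  intro fuel
  induction fuel with
  | zero =>
    intro i len lps h1 h2 h3 _ _ hlen htab hfuel
    have : i = p.length := by omega
    exact ⟨by simpa using hlen, fun t ht => htab t (by omega)⟩
  | succ fuel ih =>
    intro i len lps h1 h2 h3 hsfx hmax hlen htab hfuel
    by_cases hi : i < p.length
    · rw [lpsLoop, if_pos hi]
      -- the character being consumed is p[i]
      by_cases hc : p.getD i 'a' = p.getD len 'a'
      · rw [if_pos hc]
        -- matched: the new border length of the (i+1)-prefix is len+1
        have hlenm : len < p.length := by omega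
        have hsucc : p.take (len + 1) <:+ p.take (i + 1) := by
          rw [List.take_succ_eq_append_getElem hi]
          exact (take_succ_suffix_append p (p.take i) p[i] hlenm).mpr
            ⟨hsfx, by rw [hc.symm]; exact List.getD_eq_getElem p 'a' hi⟩
        have hbord : bordP p (i + 1) = len + 1 := by
          apply Nat.le_antisymm
          · -- every border of the (i+1)-prefix is at most len+1
            rw [bordP]
            cases hB : sfxG p (p.take (i + 1)) (i + 1 - 1) with
            | zero => omega
            | succ k =>
              have hPB := sfxG_suffix p (p.take (i + 1)) (i + 1 - 1)
              rw [hB] at hPB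
              have hkb : k + 1 ≤ i := by
                have := sfxG_le p (p.take (i + 1)) (i + 1 - 1)
                omega
              rw [List.take_succ_eq_append_getElem hi] at hPB
              have hkm : k < p.length := by omega
              have := (take_succ_suffix_append p (p.take i) p[i] hkm).mp hPB
              have hk : k ≤ len := hmax k (by omega) this.1
                (by rw [this.2]; exact (List.getD_eq_getElem p 'a' hi).symm)
              omega
          · exact le_sfxG p _ (by omega) hsucc
        refine ih (i + 1) (len + 1) (lps.set i (len + 1)) (by omega) (by omega) (by omega)
          hsucc ?_ (by simpa using hlen) ?_ (by omega)
        · intro k hk hks _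
          have : k ≤ bordP p (i + 1) := le_sfxG p _ (by omega) hks
          omega
        · intro t ht
          by_cases hti : t = i
          · subst hti
            rw [List.getD_eq_getElem _ 0 (by rw [List.length_set]; omega)]
            simp only [List.getElem_set_self]
            exact hbord.symm
          · rw [getD_set_ne' lps i _ t hti]
            exact htab t (by omega)
      · rw [if_neg hc]
        by_cases hlz : len ≠ 0
        · rw [if_pos hlz]
          -- mismatch with len > 0: fall back to the border of the len-prefix
          have hl0 : 0 < len := by omega
          have hj1 : (len - 1) + 1 = len := by omega
          have hnext : lps.getD (len - 1) 0 = bordP p len := by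
            have := htab (len - 1) (by omega)
            rwa [hj1] at this
          have hblt : bordP p len < len := bordP_lt p hl0
          have hbsfx : p.take (bordP p len) <:+ p.take i := (bordP_suffix p len).trans hsfx
          refine ih i (lps.getD (len - 1) 0) lps h1 h2 (by omega) (by rw [hnext]; exact hbsfx)
            ?_ hlen htab (by omega)
          intro k hk hks hkc
          have hkl : k ≤ len := hmax k hk hks hkc
          by_cases hkeq : k = len
          · exact absurd (hkeq ▸ hkc).symm hc
          · have : p.take k <:+ p.take len := chain_down p (p.take i) hks hsfx (by omega) (by omega)
            have : k ≤ bordP p len := le_sfxG p _ (by omega) this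
            omega
        · rw [if_neg hlz]
          have hlen0 : len = 0 := by omega
          subst hlen0
          -- mismatch with len = 0: the (i+1)-prefix has no border
          have hbord : bordP p (i + 1) = 0 := by
            rw [bordP]
            cases hB : sfxG p (p.take (i + 1)) (i + 1 - 1) with
            | zero => rfl
            | succ k =>
              have hPB := sfxG_suffix p (p.take (i + 1)) (i + 1 - 1)
              rw [hB] at hPB
              have hkb : k + 1 ≤ i := by
                have := sfxG_le p (p.take (i + 1)) (i + 1 - 1)
                omega
              rw [List.take_succ_eq_append_getElem hi] at hPB
              have hkm : k < p.length := by omega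
              have hps := (take_succ_suffix_append p (p.take i) p[i] hkm).mp hPB
              have hk : k ≤ 0 := hmax k (by omega) hps.1
                (by rw [hps.2]; exact (List.getD_eq_getElem p 'a' hi).symm)
              have hk0 : k = 0 := by omega
              subst hk0
              have hEq : p.getD i 'a' = p.getD 0 'a' := by
                rw [List.getD_eq_getElem p 'a' hi, ← hps.2]
              exact absurd hEq hc
          refine ih (i + 1) 0 (lps.set i 0) (by omega) (by omega) (by omega)
            (by simp) ?_ (by simpa using hlen) ?_ (by omega)
          · intro k hk hks _
            have : k ≤ bordP p (i + 1) := le_sfxG p _ (by omega) hks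
            omega
          · intro t ht
            by_cases hti : t = i
            · subst hti
              rw [List.getD_eq_getElem _ 0 (by rw [List.length_set]; omega)]
              simp only [List.getElem_set_self]
              exact hbord.symm
            · rw [getD_set_ne' lps i _ t hti]
              exact htab t (by omega)
    · rw [lpsLoop, if_neg hi]
      have : i = p.length := by omega
      exact ⟨hlen, fun t ht => htab t (by omega)⟩

theorem compute_lps_array_good (p : List Char) (hm : 0 < p.length) :
    lpsGood p (compute_lps_array p) := by
  rw [compute_lps_array]
  refine lpsLoop_spec p (2 * p.length) 1 0 (List.replicate p.length 0) (Nat.le_refl _) hm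
    (by omega) (by simp) (fun k hk _ _ => by omega)
    (by simp) ?_ (by omega)
  intro t ht
  have ht0 : t = 0 := by omega
  subst ht0
  have : (List.replicate p.length (0 : Nat)).getD 0 0 = 0 := by
    rw [List.getD_eq_getElem _ 0 (by simpa using hm)]
    simp
  rw [this]
  rfl

-- one iteration of the main loop: the automaton state is the greatest prefix-suffix length
theorem kmpStep (p : List Char) (lps : List Nat) (hm : 0 < p.length) (hl : lpsGood p lps)
    (l : List Char) (c : Char) {j : Nat} (hj : j = sfxG p l (p.length - 1)) :
    (if c = p.getD (kmpInner p lps c (j + 1) j) 'a'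
      then kmpInner p lps c (j + 1) j + 1 else kmpInner p lps c (j + 1) j)
      = sfxG p (l ++ [c]) p.length := by
  have hjm : j < p.length := by
    have := hj ▸ sfxG_le p l (p.length - 1)
    omega
  have hjsfx : p.take j <:+ l := hj ▸ sfxG_suffix p l (p.length - 1)
  obtain ⟨hr_le, hr_lt, hr_sfx, hr_stop, hr_max⟩ :=
    kmpInner_spec p lps hl c l (j + 1) j (by omega) hjm hjsfx
  set r := kmpInner p lps c (j + 1) j with hrdef
  by_cases hcr : c = p.getD r 'a'
  · rw [if_pos hcr]
    apply Nat.le_antisymm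
    · apply le_sfxG p _ (by omega)
      exact (take_succ_suffix_append p l c hr_lt).mpr ⟨hr_sfx, hcr.symm⟩
    · -- every prefix-suffix of l ++ [c] has length at most r + 1
      cases hB : sfxG p (l ++ [c]) p.length with
      | zero => omega
      | succ k =>
        have hPB := sfxG_suffix p (l ++ [c]) p.length
        rw [hB] at hPB
        have hkb : k + 1 ≤ p.length := by
          have := sfxG_le p (l ++ [c]) p.length
          omega
        have hkm : k < p.length := by omega
        have hps := (take_succ_suffix_append p l c hkm).mp hPB
        have hkj : k ≤ j := hj ▸ le_sfxG p l (by omega) hps.1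
        have : k ≤ r := hr_max k hkj hps.1 hps.2.symm
        omega
  · rw [if_neg hcr]
    have hr0 : r = 0 := by
      rcases hr_stop with h0 | hcs
      · exact h0
      · exact absurd hcs hcr
    cases hB : sfxG p (l ++ [c]) p.length with
    | zero => omega
    | succ k =>
      exfalso
      have hPB := sfxG_suffix p (l ++ [c]) p.length
      rw [hB] at hPB
      have hkb : k + 1 ≤ p.length := by
        have := sfxG_le p (l ++ [c]) p.length
        omega
      have hkm : k < p.length := by omega
      have hps := (take_succ_suffix_append p l c hkm).mp hPB
      have hkj : k ≤ j := hj ▸ le_sfxG p l (by omega) hps.1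
      have hk0 : k ≤ r := hr_max k hkj hps.1 hps.2.symm
      rw [hr0] at hk0
      have : k = 0 := by omega
      subst this
      exact hcr (hr0 ▸ hps.2.symm)

theorem sfxG_drop_bound (p l : List Char) (hm : 0 < p.length)
    (h : sfxG p l p.length < p.length) : sfxG p l (p.length - 1) = sfxG p l p.length := by
  apply Nat.le_antisymm
  · exact le_sfxG p l (Nat.le_trans (sfxG_le p l _) (by omega)) (sfxG_suffix p l _)
  · exact le_sfxG p l (by omega) (sfxG_suffix p l _)

theorem sfxG_full_iff (p l : List Char) : sfxG p l p.length = p.length ↔ p <:+ l := by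
  constructor
  · intro h
    have := sfxG_suffix p l p.length
    rwa [h, List.take_length] at this
  · intro h
    exact Nat.le_antisymm (sfxG_le p l _)
      (le_sfxG p l (Nat.le_refl _) (by rwa [List.take_length]))

theorem sfxG_after_match (p l : List Char) (hm : 0 < p.length) (h : p <:+ l) :
    sfxG p l (p.length - 1) = bordP p p.length := by
  have htk : p.take p.length = p := List.take_length
  rw [bordP, htk]
  apply Nat.le_antisymm
  · apply le_sfxG p p (sfxG_le p l _)
    have hj : p.take p.length <:+ l := by rw [htk]; exact h
    have := chain_down p l (sfxG_suffix p l (p.length - 1)) hj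
      (Nat.le_trans (sfxG_le p l (p.length - 1)) (by omega)) (Nat.le_refl _)
    rwa [htk] at this
  · apply le_sfxG p l (sfxG_le p p _)
    exact (sfxG_suffix p p _).trans h

theorem match_iff (p t : List Char) {i : Nat} (hm : 0 < p.length) (hi : i + 1 ≤ t.length) :
    p <:+ t.take (i + 1) ↔ (p.length ≤ i + 1 ∧ (t.drop (i + 1 - p.length)).take p.length = p) := by
  have hlen : (t.take (i + 1)).length = i + 1 := List.length_take_of_le hi
  constructor
  · intro h
    have hle : p.length ≤ i + 1 := by
      have := List.IsSuffix.length_le h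
      omega
    have harith : i + 1 - (i + 1 - p.length) = p.length := by omega
    refine ⟨hle, ?_⟩
    have h2 := List.suffix_iff_eq_drop.mp h
    rw [hlen, List.drop_take, harith] at h2
    exact h2.symm
  · rintro ⟨hle, hEq⟩
    have harith : i + 1 - (i + 1 - p.length) = p.length := by omega
    rw [List.suffix_iff_eq_drop, hlen, List.drop_take, harith]
    exact hEq.symm

theorem occList_step (p t : List Char) (i : Nat) (_hm : 0 < p.length) :
    occList p t (i + 1) =
      occList p t i ++
        (if p.length ≤ i + 1 ∧ (t.drop (i + 1 - p.length)).take p.length = p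
          then [((i + 1 - p.length : Nat) : Int)] else []) := by
  by_cases hcase : p.length ≤ i + 1
  · have h2 : i + 1 + 1 - p.length = (i + 1 - p.length) + 1 := by omega
    rw [occList, occList, h2, List.range_succ]
    simp only [List.filter_append]
    by_cases hEq : (t.drop (i + 1 - p.length)).take p.length = p
    · simp [hEq, hcase]
    · simp [hEq, hcase]
  · have h0 : i + 1 + 1 - p.length = i + 1 - p.length := by omega
    rw [occList, occList, h0]
    simp [hcase]

theorem sfxG_nil (p : List Char) {b : Nat} (hb : b < p.length) : sfxG p [] b = 0 := by
  cases hB : sfxG p [] b with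
  | zero => rfl
  | succ k =>
    exfalso
    have hPB := sfxG_suffix p [] b
    rw [hB] at hPB
    have hkb := sfxG_le p [] b
    rw [hB] at hkb
    have h2 : p.take (k + 1) = [] := List.suffix_nil.mp hPB
    have h3 : (p.take (k + 1)).length = 0 := by rw [h2]; rfl
    rw [List.length_take] at h3
    omega

theorem kmpLoop_spec (p t : List Char) (lps : List Nat) (hm : 0 < p.length) (hl : lpsGood p lps) :
    ∀ i j res, i ≤ t.length → j = sfxG p (t.take i) (p.length - 1) → res = occList p t i →
      kmpLoop p lps (t.drop i) i j res = occList p t t.length := by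
  have key : ∀ d i j res, t.length - i = d → i ≤ t.length →
      j = sfxG p (t.take i) (p.length - 1) → res = occList p t i →
      kmpLoop p lps (t.drop i) i j res = occList p t t.length := by
    intro d
    induction d with
    | zero =>
      intro i j res hd hi _ hres
      have hieq : i = t.length := by omega
      subst hieq
      rw [List.drop_length]
      simpa [kmpLoop] using hres
    | succ d ih =>
      intro i j res hd hi hj hres
      have hilt : i < t.length := by omega
      rw [List.drop_eq_getElem_cons hilt]
      simp only [kmpLoop]
      have hstep := kmpStep p lps hm hl (t.take i) t[i] hj
      have htk : t.take i ++ [t[i]] = t.take (i + 1) := (List.take_succ_eq_append_getElem hilt).symm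
      rw [htk] at hstep
      rw [hstep]
      by_cases hfull : sfxG p (t.take (i + 1)) p.length = p.length
      · rw [if_pos hfull]
        have hmatch : p <:+ t.take (i + 1) := (sfxG_full_iff p _).mp hfull
        have hcond := (match_iff p t hm (by omega)).mp hmatch
        have hmlen : p.length ≤ i + 1 := hcond.1
        apply ih (i + 1) _ _ (by omega) (by omega) ?_ ?_
        · -- the automaton falls back to the longest border of the full pattern
          rw [hfull]
          have hp1 : (p.length - 1) + 1 = p.length := by omega
          have := hl.2 (p.length - 1) (by omega)
          rw [hp1] at this
          rw [this]
          exact (sfxG_after_match p (t.take (i + 1)) hm hmatch).symm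
        · rw [occList_step p t i hm, if_pos hcond, hres]
          congr 1
          have : ((i + 1 - p.length : Nat) : Int) = (i : Int) - (p.length : Int) + 1 := by omega
          rw [this]
      · rw [if_neg hfull]
        have hlt : sfxG p (t.take (i + 1)) p.length < p.length :=
          lt_of_le_of_ne (sfxG_le p _ _) hfull
        apply ih (i + 1) _ _ (by omega) (by omega) ?_ ?_
        · exact (sfxG_drop_bound p _ hm hlt).symm
        · rw [occList_step p t i hm, if_neg, hres, List.append_nil]
          intro hcond
          exact hfull ((sfxG_full_iff p _).mpr ((match_iff p t hm (by omega)).mpr hcond))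
  intro i j res hi hj hres
  exact key (t.length - i) i j res rfl hi hj hres

-- ===== VERDICT (by name: the statement is the Claim_ definition above) =====
theorem kmp_pattern_match_spec : Claim_equal_kmp_pattern_match := by
  intro text pattern _
  unfold Spec_kmp_pattern_match kmp_pattern_match kmp_pattern_match_alt
  simp only []
  by_cases hg : text.toList.length < pattern.toList.length ∨ pattern.toList.length = 0
  · rw [if_pos hg, if_pos (by omega)]
  · rw [not_or] at hg
    obtain ⟨h1, h2⟩ := hg
    have hm : 0 < pattern.toList.length := by omega
    have hmn : pattern.toList.length ≤ text.toList.length := by omega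
    rw [if_neg (by omega), if_neg (by omega)]
    have hlps := compute_lps_array_good pattern.toList hm
    have h0 : (0 : Nat) = sfxG pattern.toList (text.toList.take 0) (pattern.toList.length - 1) := by
      rw [List.take_zero]
      exact (sfxG_nil pattern.toList (by omega)).symm
    have hres0 : ([] : List Int) = occList pattern.toList text.toList 0 := by
      have : 0 + 1 - pattern.toList.length = 0 := by omega
      rw [occList, this]
      rfl
    have hrun := kmpLoop_spec pattern.toList text.toList (compute_lps_array pattern.toList)
      hm hlps 0 0 [] (by omega) h0 hres0
    rw [List.drop_zero] at hrun
    rw [hrun, occList]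
    have harith : text.toList.length + 1 - pattern.toList.length
        = text.toList.length - pattern.toList.length + 1 := by omega
    rw [harith]
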